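-- pv_equiv track=rewrite | github.com/Kulieshova/advent-of-code-2024 | day 2/day2.py | is_safe_problem_dampener
-- ===== SOURCE A (Python) =====
-- max_change = 3
--
-- min_change = 1
--
-- def is_safe_simple(level):
--     is_increasing = level[0] < level[1]
--     is_decreasing = level[0] > level[1]
--     is_safe = True
--
--     for i in range(len(level) - 1):
--         if not is_pair_safe(level[i], level[i+1], is_decreasing, is_increasing):
--             is_safe = False
--             break
--     return is_safe
--
-- def is_pair_safe(a, b, is_decreasing, is_increasing):
--     if abs(a - b) > max_change or abs(a - b) < min_change:
--         return False
--     elif is_decreasing and a < b: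
--         return False
--     elif is_increasing and a > b:
--         return False
--     return True
--
-- def is_safe_problem_dampener(level):
--     if is_safe_simple(level):
--         return True
--     else:
--         i = 0
--         while i < len(level):
--             if is_safe_simple(level[:i] + level[i+1:]):
--                 return True
--             i += 1
--         return False
-- ===== SOURCE B (Python) =====
-- def is_safe_problem_dampener(level):
--     return (_dampened(level, lambda a, b: 1 <= b - a <= 3)
--             or _dampened(level, lambda a, b: 1 <= a - b <= 3))
--
-- def _dampened(level, ok):
--     # advance to the first adjacent pair violating ok; O(n) overall
--     n = len(level)
--     i = 0
--     while i + 1 < n and ok(level[i], level[i + 1]):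
--         i += 1
--     if i + 1 >= n:
--         return True
--     # any removal other than i or i+1 leaves the bad pair adjacent
--     return (_clean(level[:i] + level[i + 1:], ok)
--             or _clean(level[:i + 1] + level[i + 2:], ok))
--
-- def _clean(l, ok):
--     return all(ok(a, b) for a, b in zip(l, l[1:]))
-- ===== Notes on version B (the rewrite author's own statement) =====
-- stated objective: faster
-- what changed: Instead of retrying is_safe_simple on all n one-element-removed copies (O(n^2)), B scans once per direction to the first violating adjacent pair and checks only the two removals (that pair's endpoints) that can possibly fix it, O(n).
import Mathlib
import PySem

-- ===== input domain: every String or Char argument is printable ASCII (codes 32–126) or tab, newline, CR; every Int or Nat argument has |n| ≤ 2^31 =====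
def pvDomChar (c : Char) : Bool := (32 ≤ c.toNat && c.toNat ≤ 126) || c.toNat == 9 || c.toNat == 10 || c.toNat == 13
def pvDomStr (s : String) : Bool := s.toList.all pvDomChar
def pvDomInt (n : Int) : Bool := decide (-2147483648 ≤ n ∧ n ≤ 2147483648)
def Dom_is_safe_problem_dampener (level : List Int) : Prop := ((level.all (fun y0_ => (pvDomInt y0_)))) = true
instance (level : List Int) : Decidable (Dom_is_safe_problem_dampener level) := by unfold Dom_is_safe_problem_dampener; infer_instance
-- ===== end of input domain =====

-- B replaces A's retry-every-removal loop by one scan per direction to the first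
-- violating adjacent pair, checking only the two removals that can fix it (objective: faster, O(n) vs O(n^2)).

-- ===== PORT A =====
def is_pair_safe (a b : Int) (is_decreasing is_increasing : Bool) : Bool :=
  if 3 < (a - b).natAbs ∨ (a - b).natAbs < 1 then false
  else if is_decreasing = true ∧ a < b then false
  else if is_increasing = true ∧ a > b then false
  else true

-- the 'for i in range(len-1)' loop with break, as recursion over adjacent pairs
def pvSafeLoop (is_decreasing is_increasing : Bool) : List Int → Bool
  | a :: b :: rest => is_pair_safe a b is_decreasing is_increasing && pvSafeLoop is_decreasing is_increasing (b :: rest)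
  | _ => true

def is_safe_simple : List Int → Bool
  | [] => false      -- level[0] raises IndexError (excluded by Pre_)
  | [_] => false     -- level[1] raises IndexError (excluded by Pre_)
  | a :: b :: rest => pvSafeLoop (decide (a > b)) (decide (a < b)) (a :: b :: rest)

-- level[:i] + level[i+1:] with i ≥ 0 is exactly take i ++ drop (i+1)
def is_safe_problem_dampener (level : List Int) : Bool :=
  if is_safe_simple level then true
  else (List.range level.length).any fun i =>
    is_safe_simple (level.take i ++ level.drop (i + 1))

-- ===== PORT B =====
def pvOkInc (a b : Int) : Bool := decide (1 ≤ b - a ∧ b - a ≤ 3)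
def pvOkDec (a b : Int) : Bool := decide (1 ≤ a - b ∧ a - b ≤ 3)

def pvClean (ok : Int → Int → Bool) : List Int → Bool
  | a :: b :: rest => ok a b && pvClean ok (b :: rest)
  | _ => true

-- the 'while i + 1 < n and ok(...)' advance: index of the first violating pair
def pvFirstViol (ok : Int → Int → Bool) : List Int → Nat → Option Nat
  | a :: b :: rest, i => if ok a b then pvFirstViol ok (b :: rest) (i + 1) else some i
  | _, _ => none

def pvDampened (ok : Int → Int → Bool) (level : List Int) : Bool :=
  match pvFirstViol ok level 0 with
  | none => true
  | some i => pvClean ok (level.take i ++ level.drop (i + 1))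
           || pvClean ok (level.take (i + 1) ++ level.drop (i + 2))

def is_safe_problem_dampener_alt (level : List Int) : Bool :=
  pvDampened pvOkInc level || pvDampened pvOkDec level

-- ===== PRECONDITION & SPEC =====
-- Pre_ excludes exactly the inputs on which A raises IndexError: lists of length < 2,
-- and 2-element lists whose pair difference lies outside the 1..3 band (the dampener then calls
-- is_safe_simple on a 1-element list).
def Pre_is_safe_problem_dampener (level : List Int) : Prop :=
  3 ≤ level.length ∨
    (level.length = 2 ∧ 1 ≤ (level.getD 0 0 - level.getD 1 0).natAbs ∧
      (level.getD 0 0 - level.getD 1 0).natAbs ≤ 3)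
instance (level : List Int) : Decidable (Pre_is_safe_problem_dampener level) := by
  unfold Pre_is_safe_problem_dampener; infer_instance

def pvWitness_is_safe_problem_dampener : List Int := [1, 2, 4]

def Spec_is_safe_problem_dampener (level : List Int) (out : Bool) : Prop := out = is_safe_problem_dampener_alt level
instance (level : List Int) (out : Bool) : Decidable (Spec_is_safe_problem_dampener level out) := by unfold Spec_is_safe_problem_dampener; infer_instance

-- ===== CLAIM (what is proved, stated in full; the proofs are below) =====
def Claim_equal_is_safe_problem_dampener : Prop := ∀ (level : List Int), Dom_is_safe_problem_dampener level → Pre_is_safe_problem_dampener level → Spec_is_safe_problem_dampener level (is_safe_problem_dampener level)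

-- ===== LEMMAS AND PROOFS =====

theorem pv_pair_inc (a b : Int) : is_pair_safe a b false true = pvOkInc a b := by
  unfold is_pair_safe pvOkInc; split_ifs with h1 h2 h3 <;> simp_all <;> omega

theorem pv_pair_dec (a b : Int) : is_pair_safe a b true false = pvOkDec a b := by
  unfold is_pair_safe pvOkDec; split_ifs with h1 h2 h3 <;> simp_all <;> omega

theorem pv_loop_inc : ∀ l : List Int, pvSafeLoop false true l = pvClean pvOkInc l
  | [] => rfl
  | [_] => rfl
  | a :: b :: rest => by
      simp [pvSafeLoop, pvClean, pv_pair_inc, pv_loop_inc (b :: rest)]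

theorem pv_loop_dec : ∀ l : List Int, pvSafeLoop true false l = pvClean pvOkDec l
  | [] => rfl
  | [_] => rfl
  | a :: b :: rest => by
      simp [pvSafeLoop, pvClean, pv_pair_dec, pv_loop_dec (b :: rest)]

theorem pv_simple_eq : ∀ (l : List Int), 2 ≤ l.length →
    is_safe_simple l = (pvClean pvOkInc l || pvClean pvOkDec l)
  | a :: b :: rest, _ => by
      rcases lt_trichotomy a b with h | h | h
      · have hlt : decide (a < b) = true := by simp [h]
        have hgt : decide (a > b) = false := by simp; omega
        rw [is_safe_simple, hlt, hgt, pv_loop_inc]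
        have : pvClean pvOkDec (a :: b :: rest) = false := by
          simp [pvClean, pvOkDec]; omega
        simp [this]
      · subst h
        have hps : is_pair_safe a a false false = false := by
          unfold is_pair_safe; split_ifs with h1 <;> simp_all
        simp [is_safe_simple, pvSafeLoop, hps, pvClean, pvOkInc, pvOkDec]
      · have hlt : decide (a < b) = false := by simp; omega
        have hgt : decide (a > b) = true := by simp [h]
        rw [is_safe_simple, hlt, hgt, pv_loop_dec]
        have : pvClean pvOkInc (a :: b :: rest) = false := by
          simp [pvClean, pvOkInc]; omega
        simp [this]

theorem pv_clean_iff (ok : Int → Int → Bool) : ∀ (l : List Int),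
    pvClean ok l = true ↔ ∀ k : Nat, k + 1 < l.length → ok (l.getD k 0) (l.getD (k + 1) 0) = true
  | [] => by simp [pvClean]
  | [_] => by simp [pvClean]
  | a :: b :: rest => by
      rw [pvClean, Bool.and_eq_true, pv_clean_iff ok (b :: rest)]
      constructor
      · rintro ⟨h0, h⟩ k hk
        cases k with
        | zero => simpa using h0
        | succ k => simpa using h k (by simpa using hk)
      · intro h
        refine ⟨by simpa using h 0 (by simp), fun k hk => ?_⟩
        simpa using h (k + 1) (by simpa using hk)

theorem pv_firstViol_none (ok : Int → Int → Bool) : ∀ (l : List Int) (j : Nat),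
    pvFirstViol ok l j = none ↔ pvClean ok l = true
  | [], _ => by simp [pvFirstViol, pvClean]
  | [_], _ => by simp [pvFirstViol, pvClean]
  | a :: b :: rest, j => by
      rw [pvFirstViol, pvClean]
      by_cases h : ok a b = true
      · simp [h, pv_firstViol_none ok (b :: rest) (j + 1)]
      · simp [h]

theorem pv_firstViol_some (ok : Int → Int → Bool) : ∀ (l : List Int) (j i : Nat),
    pvFirstViol ok l j = some i →
    ∃ k : Nat, i = j + k ∧ k + 1 < l.length ∧ ok (l.getD k 0) (l.getD (k + 1) 0) = false
  | [], j, i => by simp [pvFirstViol]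
  | [_], j, i => by simp [pvFirstViol]
  | a :: b :: rest, j, i => by
      rw [pvFirstViol]
      by_cases h : ok a b = true
      · rw [if_pos h]
        intro hv
        obtain ⟨k, hk1, hk2, hk3⟩ := pv_firstViol_some ok (b :: rest) (j + 1) i hv
        exact ⟨k + 1, by omega, by simpa using hk2, by simpa using hk3⟩
      · rw [if_neg h]
        intro hv
        obtain rfl : j = i := by simpa using hv
        refine ⟨0, by omega, by simp, ?_⟩
        simpa [Bool.not_eq_true] using h
  termination_by l => l.length

-- element of take j ++ drop (j+1)
theorem pv_remove_getD (l : List Int) (j m : Nat) (hj : j < l.length) :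
    (l.take j ++ l.drop (j + 1)).getD m 0 = if m < j then l.getD m 0 else l.getD (m + 1) 0 := by
  have hlen : (l.take j).length = j := by simp; omega
  by_cases h : m < j
  · rw [if_pos h, List.getD_eq_getElem?_getD, List.getElem?_append_left (by omega),
      List.getElem?_take]
    simp [h, List.getD_eq_getElem?_getD]
  · rw [if_neg h, List.getD_eq_getElem?_getD, List.getElem?_append_right (by omega),
      hlen, List.getElem?_drop, List.getD_eq_getElem?_getD]
    congr 2
    omega

theorem pv_remove_length (l : List Int) (j : Nat) (hj : j < l.length) :
    (l.take j ++ l.drop (j + 1)).length = l.length - 1 := by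
  simp; omega

-- a removal elsewhere leaves the violating pair adjacent
theorem pv_only_two (ok : Int → Int → Bool) (l : List Int) (k j : Nat)
    (hk : k + 1 < l.length) (hbad : ok (l.getD k 0) (l.getD (k + 1) 0) = false)
    (hj : j < l.length) (hj1 : j ≠ k) (hj2 : j ≠ k + 1) :
    pvClean ok (l.take j ++ l.drop (j + 1)) = false := by
  rcases Nat.lt_or_ge j k with h | h
  · -- j < k: the pair sits at positions k-1, k of the removed list
    have h1 : (l.take j ++ l.drop (j + 1)).getD (k - 1) 0 = l.getD k 0 := by
      rw [pv_remove_getD l j (k - 1) hj, if_neg (by omega)]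
      congr 1; omega
    have h2 : (l.take j ++ l.drop (j + 1)).getD (k - 1 + 1) 0 = l.getD (k + 1) 0 := by
      rw [pv_remove_getD l j (k - 1 + 1) hj, if_neg (by omega)]
      congr 1; omega
    by_contra hcon
    rw [Bool.not_eq_false] at hcon
    have := (pv_clean_iff ok _).mp hcon (k - 1)
      (by rw [pv_remove_length l j hj]; omega)
    rw [h1, h2, hbad] at this; exact absurd this (by simp)
  · -- j > k+1: the pair sits at positions k, k+1 of the removed list
    have hjk : k + 1 < j := by omega
    have h1 : (l.take j ++ l.drop (j + 1)).getD k 0 = l.getD k 0 := by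
      rw [pv_remove_getD l j k hj, if_pos (by omega)]
    have h2 : (l.take j ++ l.drop (j + 1)).getD (k + 1) 0 = l.getD (k + 1) 0 := by
      rw [pv_remove_getD l j (k + 1) hj, if_pos (by omega)]
    by_contra hcon
    rw [Bool.not_eq_false] at hcon
    have := (pv_clean_iff ok _).mp hcon k
      (by rw [pv_remove_length l j hj]; omega)
    rw [h1, h2, hbad] at this; exact absurd this (by simp)

-- B's scan-and-fix equals A's shape: clean, or some single removal is clean
theorem pv_dampened_eq (ok : Int → Int → Bool) (l : List Int) :
    pvDampened ok l =
      (pvClean ok l || (List.range l.length).any fun j => pvClean ok (l.take j ++ l.drop (j + 1))) := by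
  unfold pvDampened
  rcases hfv : pvFirstViol ok l 0 with _ | i
  · rw [(pv_firstViol_none ok l 0).mp hfv]; rfl
  · obtain ⟨k, hik, hk, hbad⟩ := pv_firstViol_some ok l 0 i hfv
    have hi : i = k := by omega
    subst hi
    have hclean : pvClean ok l = false := by
      by_contra h
      rw [Bool.not_eq_false] at h
      rw [(pv_firstViol_none ok l 0).mpr h] at hfv; exact absurd hfv (by simp)
    rw [hclean, Bool.false_or]
    rw [Bool.eq_iff_iff, Bool.or_eq_true, List.any_eq_true]
    constructor
    · rintro (h | h)
      · exact ⟨i, by simp; omega, h⟩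
      · exact ⟨i + 1, by simp; omega, h⟩
    · rintro ⟨j, hjmem, hjc⟩
      have hjl : j < l.length := by simpa using hjmem
      by_cases h1 : j = i
      · subst h1; exact Or.inl hjc
      by_cases h2 : j = i + 1
      · subst h2; exact Or.inr hjc
      · rw [pv_only_two ok l i j hk hbad hjl h1 h2] at hjc
        exact absurd hjc (by simp)

-- A as one boolean formula
theorem pv_A_eq (l : List Int) :
    is_safe_problem_dampener l =
      (is_safe_simple l || (List.range l.length).any fun i => is_safe_simple (l.take i ++ l.drop (i + 1))) := by
  unfold is_safe_problem_dampener
  by_cases h : is_safe_simple l = true <;> simp [h]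

-- ===== VERDICT (by name: the statement is the Claim_ definition above) =====
theorem is_safe_problem_dampener_spec : Claim_equal_is_safe_problem_dampener := by
  intro l _ hpre
  unfold Spec_is_safe_problem_dampener is_safe_problem_dampener_alt
  rw [pv_A_eq, pv_dampened_eq, pv_dampened_eq]
  rcases hpre with h3 | ⟨h2, hlo, hhi⟩
  · -- length ≥ 3: every removal has length ≥ 2, rewrite is_safe_simple everywhere
    have hl2 : 2 ≤ l.length := by omega
    rw [pv_simple_eq l hl2]
    have hany : ((List.range l.length).any fun i => is_safe_simple (l.take i ++ l.drop (i + 1)))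
        = ((List.range l.length).any fun i =>
            pvClean pvOkInc (l.take i ++ l.drop (i + 1)) || pvClean pvOkDec (l.take i ++ l.drop (i + 1))) := by
      refine List.any_congr rfl (fun i => ?_)
      exact pv_simple_eq _ (by simp; omega)
    rw [hany, Bool.eq_iff_iff]
    simp only [Bool.or_eq_true, List.any_eq_true]
    constructor
    · rintro ((h | h) | ⟨x, hx, hcx⟩)
      · exact Or.inl (Or.inl h)
      · exact Or.inr (Or.inl h)
      · rcases hcx with h | h
        · exact Or.inl (Or.inr ⟨x, hx, h⟩)
        · exact Or.inr (Or.inr ⟨x, hx, h⟩)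
    · rintro ((h | ⟨x, hx, h⟩) | (h | ⟨x, hx, h⟩))
      · exact Or.inl (Or.inl h)
      · exact Or.inr ⟨x, hx, Or.inl h⟩
      · exact Or.inl (Or.inr h)
      · exact Or.inr ⟨x, hx, Or.inr h⟩
  · -- length = 2 with a safe pair: both sides are true
    rcases l with _ | ⟨a, _ | ⟨b, _ | ⟨c, r⟩⟩⟩ <;> simp at h2
    simp only [List.getD_cons_zero, List.getD_cons_succ] at hlo hhi
    have hcl : (pvClean pvOkInc [a, b] || pvClean pvOkDec [a, b]) = true := by
      simp [pvClean, pvOkInc, pvOkDec]; omega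
    have hS : is_safe_simple [a, b] = true := by
      rw [pv_simple_eq ([a, b] : List Int) (by simp)]; exact hcl
    rcases (Bool.or_eq_true _ _).mp hcl with h | h <;> simp [hS, h]
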